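-- pv_equiv track=rewrite | github.com/MrBrantCode/unitest_baseline | mut_generate/mist_train_cf/cf_69152/solution.py | restructure
-- ===== SOURCE A (Python) =====
-- def restructure(s):
--     result = ''
--     for i in s:
--         # upper case
--         if 'A' <= i <= 'Z':
--             result += chr((ord(i) - ord('A') - 5) % 26 + ord('A'))
--         # lower case
--         elif 'a' <= i <= 'z':
--             result += chr((ord(i) - ord('a') - 3) % 26 + ord('a'))
--         # numbers and other characters remain intact
--         else:
--             result += i
--
--     return result
-- ===== SOURCE B (Python) =====
-- def restructure(s):
--     U = 'ABCDEFGHIJKLMNOPQRSTUVWXYZ'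
--     low = 'abcdefghijklmnopqrstuvwxyz'
--     return s.translate(str.maketrans(U + low, U[-5:] + U[:-5] + low[-3:] + low[:-3]))
-- ===== Notes on version B (the rewrite author's own statement) =====
-- stated objective: idiomatic
-- what changed: B does no character arithmetic at all: it rotates the two alphabet strings by slicing (U[-5:]+U[:-5], low[-3:]+low[:-3]), builds a translation table from them with str.maketrans, and returns s.translate(table) in one call, instead of A's per-character range tests, ord/chr modular arithmetic and string += loop.
import Mathlib
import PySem

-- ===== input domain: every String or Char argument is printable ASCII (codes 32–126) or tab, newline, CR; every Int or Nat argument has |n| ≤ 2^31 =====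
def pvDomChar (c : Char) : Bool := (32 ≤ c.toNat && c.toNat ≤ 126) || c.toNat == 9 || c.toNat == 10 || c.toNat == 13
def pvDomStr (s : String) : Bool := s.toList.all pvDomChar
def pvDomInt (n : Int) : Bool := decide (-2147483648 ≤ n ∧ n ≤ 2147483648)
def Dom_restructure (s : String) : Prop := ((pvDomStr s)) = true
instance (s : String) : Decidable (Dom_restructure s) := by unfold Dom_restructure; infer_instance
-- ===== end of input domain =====

-- B does no character arithmetic: it rotates the alphabet strings by slicing, builds a
-- maketrans table from them and translates in one call (idiomatic; same O(n) cost).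

-- ===== PORT A =====
-- ord(i) is i.toNat cast to Int; chr(n) is Char.ofNat — exact here since every code chr
-- receives is in 65..90 / 97..122.  '%' with divisor 26 is PySem.Int.mod.
def restructure (s : String) : String :=
  String.mk (s.toList.foldl (fun result i =>
    if 'A' ≤ i ∧ i ≤ 'Z' then
      result ++ [Char.ofNat (PySem.Int.mod ((i.toNat : Int) - ('A'.toNat : Int) - 5) 26 + ('A'.toNat : Int)).toNat]
    else if 'a' ≤ i ∧ i ≤ 'z' then
      result ++ [Char.ofNat (PySem.Int.mod ((i.toNat : Int) - ('a'.toNat : Int) - 3) 26 + ('a'.toNat : Int)).toNat]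
    else
      result ++ [i]) [])

-- ===== PORT B =====
-- U[-5:] + U[:-5] and low[-3:] + low[:-3]: the slice-rotated alphabets
def pvSrc : List Char :=
  "ABCDEFGHIJKLMNOPQRSTUVWXYZ".toList ++ "abcdefghijklmnopqrstuvwxyz".toList

def pvDst : List Char :=
  PySem.List.slice "ABCDEFGHIJKLMNOPQRSTUVWXYZ".toList (some (-5)) none ++
  PySem.List.slice "ABCDEFGHIJKLMNOPQRSTUVWXYZ".toList none (some (-5)) ++
  PySem.List.slice "abcdefghijklmnopqrstuvwxyz".toList (some (-3)) none ++
  PySem.List.slice "abcdefghijklmnopqrstuvwxyz".toList none (some (-3))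

-- str.maketrans(src, dst): the pairwise table, as a dict built in key order
def pvTable : PySem.Dict Char Char :=
  (pvSrc.zip pvDst).foldl (fun d kv => d.insert kv.1 kv.2) PySem.Dict.empty

-- s.translate(table): each character is replaced by its table entry, if any
def restructure_alt (s : String) : String :=
  String.mk (s.toList.map (fun c => (pvTable.get? c).getD c))

-- ===== PRECONDITION & SPEC =====
def Spec_restructure (s : String) (out : String) : Prop := out = restructure_alt s
instance (s : String) (out : String) : Decidable (Spec_restructure s out) := by unfold Spec_restructure; infer_instance

-- ===== CLAIM (what is proved, stated in full; the proofs are below) =====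
def Claim_equal_restructure : Prop := ∀ (s : String), Dom_restructure s → Spec_restructure s (restructure s)

-- ===== LEMMAS AND PROOFS =====

-- A's per-character mapping, named so the fold can be rewritten as a map
def pvMapA (i : Char) : Char :=
  if 'A' ≤ i ∧ i ≤ 'Z' then
    Char.ofNat (PySem.Int.mod ((i.toNat : Int) - ('A'.toNat : Int) - 5) 26 + ('A'.toNat : Int)).toNat
  else if 'a' ≤ i ∧ i ≤ 'z' then
    Char.ofNat (PySem.Int.mod ((i.toNat : Int) - ('a'.toNat : Int) - 3) 26 + ('a'.toNat : Int)).toNat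
  else i

-- the table Source B's maketrans builds, written out as a literal
set_option maxRecDepth 4096 in
lemma pvTable_eq : pvTable = PySem.Dict.mk [('A', 'V'), ('B', 'W'), ('C', 'X'), ('D', 'Y'), ('E', 'Z'), ('F', 'A'), ('G', 'B'), ('H', 'C'), ('I', 'D'), ('J', 'E'), ('K', 'F'), ('L', 'G'), ('M', 'H'), ('N', 'I'), ('O', 'J'), ('P', 'K'), ('Q', 'L'), ('R', 'M'), ('S', 'N'), ('T', 'O'), ('U', 'P'), ('V', 'Q'), ('W', 'R'), ('X', 'S'), ('Y', 'T'), ('Z', 'U'), ('a', 'x'), ('b', 'y'), ('c', 'z'), ('d', 'a'), ('e', 'b'), ('f', 'c'), ('g', 'd'), ('h', 'e'), ('i', 'f'), ('j', 'g'), ('k', 'h'), ('l', 'i'), ('m', 'j'), ('n', 'k'), ('o', 'l'), ('p', 'm'), ('q', 'n'), ('r', 'o'), ('s', 'p'), ('t', 'q'), ('u', 'r'), ('v', 's'), ('w', 't'), ('x', 'u'), ('y', 'v'), ('z', 'w')] := by decide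

lemma pvChar_le_iff (a b : Char) : a ≤ b ↔ a.toNat ≤ b.toNat := by
  rw [Char.le_def, UInt32.le_iff_toNat_le, Char.toNat_val, Char.toNat_val]

-- on the 58 codes covering both letter ranges, lookup agrees with A's arithmetic
lemma pvTable_lookup_of_bounds (n : Nat) (h1 : 65 ≤ n) (h2 : n ≤ 122) :
    ((pvTable.get? (Char.ofNat n)).getD (Char.ofNat n) = pvMapA (Char.ofNat n)) := by
  rw [pvTable_eq]
  interval_cases n <;> decide

-- pointwise agreement of the two per-character mappings
lemma pvTable_point (c : Char) : (pvTable.get? c).getD c = pvMapA c := by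
  by_cases hrange : 65 ≤ c.toNat ∧ c.toNat ≤ 122
  · have := pvTable_lookup_of_bounds c.toNat hrange.1 hrange.2
    rwa [Char.ofNat_toNat] at this
  · have hnone : pvTable.get? c = none := by
      rw [pvTable_eq, PySem.Dict.get?_eq_none_iff_not_mem_keys]
      simp only [PySem.Dict.keys_mk]
      intro hmem
      fin_cases hmem <;> exact hrange (by decide)
    have hu : ¬ ('A' ≤ c ∧ c ≤ 'Z') := by
      rw [pvChar_le_iff, pvChar_le_iff]
      intro h
      have eA : 'A'.toNat = 65 := rfl
      have eZ : 'Z'.toNat = 90 := rfl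
      have h1 := h.1; have h2 := h.2
      exact hrange (by omega)
    have hl : ¬ ('a' ≤ c ∧ c ≤ 'z') := by
      rw [pvChar_le_iff, pvChar_le_iff]
      intro h
      have ea : 'a'.toNat = 97 := rfl
      have ez : 'z'.toNat = 122 := rfl
      have h1 := h.1; have h2 := h.2
      exact hrange (by omega)
    rw [hnone, pvMapA, if_neg hu, if_neg hl]
    rfl

-- A's fold is the map of pvMapA
set_option maxRecDepth 4096 in
lemma restructure_eq_map (s : String) :
    restructure s = String.mk (s.toList.map pvMapA) := by
  rw [restructure]
  have hstep : (fun (result : List Char) i =>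
      if 'A' ≤ i ∧ i ≤ 'Z' then
        result ++ [Char.ofNat (PySem.Int.mod ((i.toNat : Int) - ('A'.toNat : Int) - 5) 26 + ('A'.toNat : Int)).toNat]
      else if 'a' ≤ i ∧ i ≤ 'z' then
        result ++ [Char.ofNat (PySem.Int.mod ((i.toNat : Int) - ('a'.toNat : Int) - 3) 26 + ('a'.toNat : Int)).toNat]
      else
        result ++ [i]) = fun result i => result ++ [pvMapA i] := by
    funext r i
    rw [pvMapA]
    split_ifs <;> rfl
  rw [hstep, PySem.List.foldl_append_singleton_eq_map, List.nil_append]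

-- ===== VERDICT (by name: the statement is the Claim_ definition above) =====
set_option maxRecDepth 8192 in
theorem restructure_spec : Claim_equal_restructure := by
  intro s _
  show restructure s = restructure_alt s
  rw [restructure_eq_map, restructure_alt]
  congr 1
  exact List.map_congr_left (fun c _ => (pvTable_point c).symm)
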